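-- pv_equiv track=rewrite | github.com/ravish-oo/arc-agi-oo | src/signature_builders.py | parity_mask
-- ===== SOURCE A (Python) =====
-- def _validate_rectangular(g: list[list[int]]) -> None:
--     """
--     Validate that grid g is rectangular (all rows same length).
--
--     Raises:
--         ValueError: If g is ragged (rows have different lengths).
--
--     Note: Empty grid [] is valid (0 rows).
--     """
--     if not g:
--         return  # Empty grid is valid
--
--     width = len(g[0])
--     for i, row in enumerate(g):
--         if len(row) != width:
--             raise ValueError(
--                 f"Ragged grid: row {i} has length {len(row)}, expected {width}"
--             )
--
-- def parity_mask(g: list[list[int]]) -> tuple[list[list[int]], list[list[int]]]: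
--     """
--     Compute parity partition: checkerboard pattern based on (r+c) mod 2.
--
--     Returns two disjoint 0/1 masks (M0, M1) where:
--     - M0[r][c] == 1 iff (r+c) mod 2 == 0 (even sum)
--     - M1[r][c] == 1 iff (r+c) mod 2 == 1 (odd sum)
--
--     Properties:
--     - Disjoint: M0[r][c] + M1[r][c] == 1 for all (r,c)
--     - Cover: M0 + M1 == ones(shape)
--     - Input-only: depends on (r,c) indices, not grid values
--
--     Args:
--         g: Input grid (list of lists of ints)
--
--     Returns:
--         Tuple (M0, M1) of 0/1 masks with shape == shape(g)
--
--     Raises: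
--         ValueError: If g is ragged
--
--     Examples:
--         >>> parity_mask([])
--         ([], [])
--
--         >>> parity_mask([[1]])
--         ([[1]], [[0]])
--
--         >>> parity_mask([[1, 2], [3, 4]])
--         ([[1, 0], [0, 1]], [[0, 1], [1, 0]])
--     """
--     _validate_rectangular(g)
--
--     if not g:
--         return ([], [])
--
--     h = len(g)
--     w = len(g[0])
--
--     # Initialize masks
--     m0 = [[0] * w for _ in range(h)]
--     m1 = [[0] * w for _ in range(h)]
--
--     # Fill masks based on (r+c) mod 2
--     for r in range(h):
--         for c in range(w):
--             if (r + c) % 2 == 0: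
--                 m0[r][c] = 1
--             else:
--                 m1[r][c] = 1
--
--     return (m0, m1)
-- ===== SOURCE B (Python) =====
-- def parity_mask(g: list[list[int]]) -> tuple[list[list[int]], list[list[int]]]:
--     if not g:
--         return ([], [])
--     w = len(g[0])
--     for i, row in enumerate(g):
--         if len(row) != w:
--             raise ValueError(
--                 f"Ragged grid: row {i} has length {len(row)}, expected {w}"
--             )
--     # One alternating strip long enough to cut both row templates from.
--     strip = [1, 0] * (w // 2 + 1)
--     even = strip[:w]        # row template starting with 1
--     odd = strip[1:w + 1]    # row template starting with 0
--     m0, m1 = [], []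
--     for r in range(len(g)):
--         if r % 2 == 0:
--             m0.append(even[:])
--             m1.append(odd[:])
--         else:
--             m0.append(odd[:])
--             m1.append(even[:])
--     return (m0, m1)
-- ===== Notes on version B (the rewrite author's own statement) =====
-- stated objective: alternative
-- what changed: B never evaluates (r+c)%2 per cell: it builds one alternating strip [1,0]*k, slices it into the two possible row templates, and assembles both masks by selecting whole template rows on the row parity, whereas A fills two zero matrices cell by cell.
import Mathlib
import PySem

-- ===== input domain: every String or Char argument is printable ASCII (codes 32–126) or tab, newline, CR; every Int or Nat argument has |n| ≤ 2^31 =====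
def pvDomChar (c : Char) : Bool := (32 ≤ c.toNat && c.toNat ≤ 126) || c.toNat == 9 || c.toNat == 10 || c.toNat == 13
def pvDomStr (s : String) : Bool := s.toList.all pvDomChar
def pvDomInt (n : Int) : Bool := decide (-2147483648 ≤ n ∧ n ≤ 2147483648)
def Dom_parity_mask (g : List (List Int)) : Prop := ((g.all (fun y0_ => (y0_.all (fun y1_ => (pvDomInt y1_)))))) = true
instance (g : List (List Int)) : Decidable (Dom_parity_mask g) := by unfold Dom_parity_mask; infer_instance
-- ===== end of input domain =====

-- B builds one alternating strip [1,0]*k, slices it into the two possible row templates,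
-- and assembles both masks by selecting whole template rows on the row parity; A fills
-- two zero matrices cell by cell with (r+c)%2. Objective: alternative decomposition.

-- ===== PORT A =====
-- A validates rectangularity (raising ValueError on ragged grids, excluded by Pre_),
-- then fills two zero matrices cell by cell according to (r+c) % 2.
def parity_mask (g : List (List Int)) : List (List Int) × List (List Int) :=
  if g.all (fun row => row.length == (g.headD []).length) then
    if g.isEmpty then ([], [])
    else
      let h := g.length
      let w := (g.headD []).length
      let z : List (List Int) := List.replicate h (List.replicate w 0)
      (List.range h).foldl (fun p r =>
        (List.range w).foldl (fun q c =>
          if (r + c) % 2 = 0 then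
            (q.1.modify r (fun row => row.modify c (fun _ => 1)), q.2)
          else
            (q.1, q.2.modify r (fun row => row.modify c (fun _ => 1)))) p) (z, z)
  else ([], [])  -- Python raises ValueError here (ragged grid); outside Pre_

-- ===== PORT B =====
def parity_mask_alt (g : List (List Int)) : List (List Int) × List (List Int) :=
  if g.isEmpty then ([], [])
  else if g.all (fun row => row.length == (g.headD []).length) then
    let w := (g.headD []).length
    let strip : List Int := (List.replicate (w / 2 + 1) ([1, 0] : List Int)).flatten
    let even := strip.take w         -- row template starting with 1
    let odd := (strip.drop 1).take w -- row template starting with 0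
    (List.range g.length).foldl (fun p r =>
      if r % 2 = 0 then (p.1 ++ [even], p.2 ++ [odd])
      else (p.1 ++ [odd], p.2 ++ [even])) ([], [])
  else ([], [])  -- Python raises ValueError here (ragged grid); outside Pre_

-- ===== PRECONDITION & SPEC =====
-- Pre_ excludes exactly the ragged grids, on which Python A raises ValueError.
def Pre_parity_mask (g : List (List Int)) : Prop :=
  g.all (fun row => row.length == (g.headD []).length) = true
instance (g : List (List Int)) : Decidable (Pre_parity_mask g) := by unfold Pre_parity_mask; infer_instance

def pvWitness_parity_mask : List (List Int) := [[1, 2], [3, 4]]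

def Spec_parity_mask (g : List (List Int)) (out : List (List Int) × List (List Int)) : Prop := out = parity_mask_alt g
instance (g : List (List Int)) (out : List (List Int) × List (List Int)) : Decidable (Spec_parity_mask g out) := by unfold Spec_parity_mask; infer_instance

-- ===== CLAIM (what is proved, stated in full; the proofs are below) =====
def Claim_equal_parity_mask : Prop := ∀ (g : List (List Int)), Dom_parity_mask g → Pre_parity_mask g → Spec_parity_mask g (parity_mask g)

-- ===== LEMMAS AND PROOFS =====

-- a fold over a product whose step acts componentwise splits into two folds
theorem pv_foldl_prod_split {α β γ : Type} (f : γ → α → α) (g : γ → β → β)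
    (l : List γ) (p : α × β) :
    l.foldl (fun q c => (f c q.1, g c q.2)) p
      = (l.foldl (fun a c => f c a) p.1, l.foldl (fun b c => g c b) p.2) := by
  induction l generalizing p with
  | nil => rfl
  | cons x xs ih => simpa using ih (f x p.1, g x p.2)

-- getElem? characterisation of the row-filling fold
theorem pv_rowfold_get? (cond : Nat → Bool) (v : Int) (n : Nat) (row : List Int) (j : Nat) :
    ((List.range n).foldl (fun row c => if cond c then row.modify c (fun _ => v) else row) row)[j]?
      = if j < n ∧ cond j then row[j]?.map (fun _ => v) else row[j]? := by
  induction n with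
  | zero => simp
  | succ n ih =>
    rw [List.range_succ, List.foldl_append]
    simp only [List.foldl_cons, List.foldl_nil]
    by_cases hc : cond n
    · rw [if_pos hc, List.getElem?_modify, ih]
      by_cases hj : j = n
      · subst hj
        simp [hc]
      · by_cases hjn : j < n ∧ cond j = true
        · simp only [if_pos hjn]
          have : j < n + 1 ∧ cond j = true := ⟨Nat.lt_succ_of_lt hjn.1, hjn.2⟩
          rw [if_pos this]
          cases row[j]? <;> simp [Ne.symm hj]
        · simp only [if_neg hjn]
          have : ¬ (j < n + 1 ∧ cond j = true) := by
            rintro ⟨h1, h2⟩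
            exact hjn ⟨Nat.lt_of_le_of_ne (Nat.lt_succ_iff.mp h1) hj, h2⟩
          rw [if_neg this]
          cases row[j]? <;> simp [Ne.symm hj]
    · rw [if_neg hc, ih]
      by_cases hjn : j < n ∧ cond j = true
      · rw [if_pos hjn, if_pos ⟨Nat.lt_succ_of_lt hjn.1, hjn.2⟩]
      · rw [if_neg hjn, if_neg]
        rintro ⟨h1, h2⟩
        have : j ≠ n := by rintro rfl; exact hc h2
        exact hjn ⟨Nat.lt_of_le_of_ne (Nat.lt_succ_iff.mp h1) this, h2⟩

-- the row-filling fold on a zero row yields the closed-form row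
theorem pv_rowfold_replicate (cond : Nat → Bool) (v : Int) (w : Nat) :
    (List.range w).foldl (fun row c => if cond c then row.modify c (fun _ => v) else row)
        (List.replicate w 0)
      = (List.range w).map (fun c => if cond c then v else 0) := by
  apply List.ext_getElem?
  intro j
  rw [pv_rowfold_get? cond v w (List.replicate w 0) j]
  by_cases hj : j < w
  · by_cases hc : cond j
    · simp [hj, hc]
    · simp [hj, hc]
  · simp [hj]

-- a matrix-level fold that modifies cell (r,c) equals modifying row r by the row fold
theorem pv_matfold_row (cond : Nat → Bool) (v : Int) (r : Nat) (l : List Nat)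
    (m : List (List Int)) :
    l.foldl (fun m c => if cond c then m.modify r (fun row => row.modify c (fun _ => v)) else m) m
      = m.modify r (fun row =>
          l.foldl (fun row c => if cond c then row.modify c (fun _ => v) else row) row) := by
  induction l generalizing m with
  | nil =>
    simp
    apply List.ext_getElem?
    intro j
    rw [List.getElem?_modify]
    cases m[j]? <;> simp
  | cons x xs ih =>
    simp only [List.foldl_cons]
    by_cases hc : cond x
    · rw [if_pos hc, ih]
      apply List.ext_getElem?
      intro j
      rw [List.getElem?_modify, List.getElem?_modify, List.getElem?_modify]
      cases m[j]? <;> simp <;> split <;> simp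
    · rw [if_neg hc, ih]
      apply List.ext_getElem?
      intro j
      rw [List.getElem?_modify, List.getElem?_modify]
      cases m[j]? <;> simp <;> split <;> simp

-- getElem? characterisation of the outer fold over rows
theorem pv_outerfold_get? (rowf : Nat → List Int → List Int) (n : Nat)
    (m : List (List Int)) (i : Nat) :
    ((List.range n).foldl (fun m r => m.modify r (rowf r)) m)[i]?
      = if i < n then m[i]?.map (rowf i) else m[i]? := by
  induction n with
  | zero => simp
  | succ n ih =>
    rw [List.range_succ, List.foldl_append]
    simp only [List.foldl_cons, List.foldl_nil]
    rw [List.getElem?_modify, ih]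
    by_cases hi : i = n
    · subst hi
      simp
    · by_cases hin : i < n
      · rw [if_pos hin, if_pos (Nat.lt_succ_of_lt hin)]
        cases m[i]? <;> simp [Ne.symm hi]
      · rw [if_neg hin, if_neg]
        · cases m[i]? <;> simp [Ne.symm hi]
        · intro h
          exact hin (Nat.lt_of_le_of_ne (Nat.lt_succ_iff.mp h) hi)

-- the full matrix fold on the zero matrix yields the closed-form matrix
theorem pv_matfold_replicate (cond : Nat → Nat → Bool) (v : Int) (h w : Nat) :
    (List.range h).foldl (fun m r =>
        (List.range w).foldl (fun m c =>
          if cond r c then m.modify r (fun row => row.modify c (fun _ => v)) else m) m)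
      (List.replicate h (List.replicate w 0))
      = (List.range h).map (fun r => (List.range w).map (fun c => if cond r c then v else 0)) := by
  have step : ∀ (m : List (List Int)) (r : Nat),
      (List.range w).foldl (fun m c =>
          if cond r c then m.modify r (fun row => row.modify c (fun _ => v)) else m) m
        = m.modify r (fun row =>
            (List.range w).foldl (fun row c =>
              if cond r c then row.modify c (fun _ => v) else row) row) := by
    intro m r; exact pv_matfold_row (cond r) v r (List.range w) m
  have e1 :
      (List.range h).foldl (fun m r =>
        (List.range w).foldl (fun m c =>
          if cond r c then m.modify r (fun row => row.modify c (fun _ => v)) else m) m)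
        (List.replicate h (List.replicate w 0))
      = (List.range h).foldl (fun m r => m.modify r (fun row =>
            (List.range w).foldl (fun row c =>
              if cond r c then row.modify c (fun _ => v) else row) row))
          (List.replicate h (List.replicate w 0)) :=
    PySem.List.foldl_congr_mem _ _ _ _ (fun m r _ => step m r)
  rw [e1]
  apply List.ext_getElem?
  intro i
  rw [pv_outerfold_get?]
  by_cases hi : i < h
  · simp [hi, pv_rowfold_replicate (cond i) v w]
  · simp [hi]

-- B-side: the alternating strip is the closed-form parity list
theorem pv_strip_eq (k : Nat) :
    (List.replicate k ([1, 0] : List Int)).flatten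
      = (List.range (2 * k)).map (fun i => if i % 2 = 0 then (1 : Int) else 0) := by
  induction k with
  | zero => simp
  | succ k ih =>
    rw [List.replicate_succ', List.flatten_append, ih]
    have h2 : 2 * (k + 1) = (2 * k + 1) + 1 := by omega
    rw [h2, List.range_succ, List.range_succ, List.map_append, List.map_append,
        List.append_assoc]
    congr 1
    have e0 : (2 * k) % 2 = 0 := by omega
    have e1 : (2 * k + 1) % 2 = 1 := by omega
    simp [e0, e1]

-- B-side: the appending fold builds the map over row indices
theorem pv_appendfold_eq_map (even odd : List Int) (h : Nat) :
    (List.range h).foldl (fun (p : List (List Int) × List (List Int)) r =>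
        if r % 2 = 0 then (p.1 ++ [even], p.2 ++ [odd])
        else (p.1 ++ [odd], p.2 ++ [even])) ([], [])
      = ((List.range h).map (fun r => if r % 2 = 0 then even else odd),
         (List.range h).map (fun r => if r % 2 = 0 then odd else even)) := by
  have e1 :
      (List.range h).foldl (fun (p : List (List Int) × List (List Int)) r =>
        if r % 2 = 0 then (p.1 ++ [even], p.2 ++ [odd])
        else (p.1 ++ [odd], p.2 ++ [even])) ([], [])
      = (List.range h).foldl (fun (p : List (List Int) × List (List Int)) r =>
          (p.1 ++ [if r % 2 = 0 then even else odd],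
           p.2 ++ [if r % 2 = 0 then odd else even])) ([], []) := by
    apply PySem.List.foldl_congr_mem
    intro p r _
    by_cases hr : r % 2 = 0 <;> simp [hr]
  rw [e1, pv_foldl_prod_split
        (fun r (l : List (List Int)) => l ++ [if r % 2 = 0 then even else odd])
        (fun r (l : List (List Int)) => l ++ [if r % 2 = 0 then odd else even])]
  rw [PySem.List.foldl_append_singleton_eq_map, PySem.List.foldl_append_singleton_eq_map]
  simp

theorem parity_mask_spec : Claim_equal_parity_mask := by
  intro g _ hpre
  unfold Pre_parity_mask at hpre
  unfold Spec_parity_mask parity_mask parity_mask_alt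
  rw [if_pos hpre]
  by_cases hg : g.isEmpty
  · rw [if_pos hg, if_pos hg]
  · rw [if_neg hg, if_neg hg, if_pos hpre]
    show ((List.range g.length).foldl (fun p r =>
          (List.range (g.headD []).length).foldl (fun q c =>
            if (r + c) % 2 = 0 then
              (q.1.modify r (fun row => row.modify c (fun _ => 1)), q.2)
            else
              (q.1, q.2.modify r (fun row => row.modify c (fun _ => 1)))) p)
          (List.replicate g.length (List.replicate (g.headD []).length 0),
           List.replicate g.length (List.replicate (g.headD []).length 0)))
      = ((List.range g.length).foldl (fun (p : List (List Int) × List (List Int)) r =>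
          if r % 2 = 0 then
            (p.1 ++ [((List.replicate ((g.headD []).length / 2 + 1) ([1,0] : List Int)).flatten.take (g.headD []).length)],
             p.2 ++ [(((List.replicate ((g.headD []).length / 2 + 1) ([1,0] : List Int)).flatten.drop 1).take (g.headD []).length)])
          else
            (p.1 ++ [(((List.replicate ((g.headD []).length / 2 + 1) ([1,0] : List Int)).flatten.drop 1).take (g.headD []).length)],
             p.2 ++ [((List.replicate ((g.headD []).length / 2 + 1) ([1,0] : List Int)).flatten.take (g.headD []).length)])) ([], []))
    generalize (g.headD []).length = w
    generalize g.length = h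
    -- A side to closed form (as in pv_matfold_replicate, for both components)
    have hsplitA :
        (List.range h).foldl (fun p r =>
          (List.range w).foldl (fun q c =>
            if (r + c) % 2 = 0 then
              (q.1.modify r (fun row => row.modify c (fun _ => (1:Int))), q.2)
            else
              (q.1, q.2.modify r (fun row => row.modify c (fun _ => (1:Int))))) p)
          (List.replicate h (List.replicate w (0:Int)), List.replicate h (List.replicate w (0:Int)))
        = ((List.range h).map (fun r => (List.range w).map (fun c => if (r + c) % 2 == 0 then (1:Int) else 0)),
           (List.range h).map (fun r => (List.range w).map (fun c => if !((r + c) % 2 == 0) then (1:Int) else 0))) := by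
      have inner : ∀ (r : Nat) (p : List (List Int) × List (List Int)),
          (List.range w).foldl (fun q c =>
            if (r + c) % 2 = 0 then
              (q.1.modify r (fun row => row.modify c (fun _ => (1:Int))), q.2)
            else
              (q.1, q.2.modify r (fun row => row.modify c (fun _ => (1:Int))))) p
          = ((List.range w).foldl (fun m c =>
                if (r + c) % 2 == 0 then m.modify r (fun row => row.modify c (fun _ => (1:Int))) else m) p.1,
             (List.range w).foldl (fun m c =>
                if !((r + c) % 2 == 0) then m.modify r (fun row => row.modify c (fun _ => (1:Int))) else m) p.2) := by
        intro r p
        have := pv_foldl_prod_split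
          (fun c m => if (r + c) % 2 == 0 then m.modify r (fun row => row.modify c (fun _ => (1:Int))) else m)
          (fun c m => if !((r + c) % 2 == 0) then m.modify r (fun row => row.modify c (fun _ => (1:Int))) else m)
          (List.range w) p
        rw [← this]
        apply PySem.List.foldl_congr_mem
        intro q c _
        by_cases hc : (r + c) % 2 = 0 <;> simp [hc]
      have e2 :
          (List.range h).foldl (fun (p : List (List Int) × List (List Int)) r =>
            (List.range w).foldl (fun q c =>
              if (r + c) % 2 = 0 then
                (q.1.modify r (fun row => row.modify c (fun _ => (1:Int))), q.2)
              else
                (q.1, q.2.modify r (fun row => row.modify c (fun _ => (1:Int))))) p)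
            (List.replicate h (List.replicate w (0:Int)), List.replicate h (List.replicate w (0:Int)))
          = (List.range h).foldl (fun (p : List (List Int) × List (List Int)) r =>
            ((List.range w).foldl (fun m c =>
                if (r + c) % 2 == 0 then m.modify r (fun row => row.modify c (fun _ => (1:Int))) else m) p.1,
             (List.range w).foldl (fun m c =>
                if !((r + c) % 2 == 0) then m.modify r (fun row => row.modify c (fun _ => (1:Int))) else m) p.2))
            (List.replicate h (List.replicate w (0:Int)), List.replicate h (List.replicate w (0:Int))) :=
        PySem.List.foldl_congr_mem _ _ _ _ (fun p r _ => inner r p)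
      rw [e2, pv_foldl_prod_split
        (fun r (m : List (List Int)) => (List.range w).foldl (fun m c =>
            if (r + c) % 2 == 0 then m.modify r (fun row => row.modify c (fun _ => (1:Int))) else m) m)
        (fun r (m : List (List Int)) => (List.range w).foldl (fun m c =>
            if !((r + c) % 2 == 0) then m.modify r (fun row => row.modify c (fun _ => (1:Int))) else m) m)]
      rw [pv_matfold_replicate (fun r c => (r + c) % 2 == 0) 1 h w,
          pv_matfold_replicate (fun r c => !((r + c) % 2 == 0)) 1 h w]
    rw [hsplitA, pv_appendfold_eq_map]
    -- B's templates in closed form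
    have hk : w ≤ 2 * (w / 2 + 1) := by omega
    have heven : ((List.replicate (w / 2 + 1) ([1,0] : List Int)).flatten.take w)
        = (List.range w).map (fun c => if c % 2 = 0 then (1:Int) else 0) := by
      rw [pv_strip_eq, ← List.map_take, List.take_range, Nat.min_eq_left hk]
    have hodd : (((List.replicate (w / 2 + 1) ([1,0] : List Int)).flatten.drop 1).take w)
        = (List.range w).map (fun c => if c % 2 = 0 then (0:Int) else 1) := by
      rw [pv_strip_eq]
      have h1 : 2 * (w / 2 + 1) = (2 * (w / 2) + 1) + 1 := by omega
      rw [h1, List.range_succ_eq_map]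
      simp only [List.map_cons, List.drop_succ_cons, List.drop_zero, List.map_map]
      rw [← List.map_take, List.take_range, Nat.min_eq_left (by omega)]
      apply List.map_congr_left
      intro c _
      have : (c + 1) % 2 = 1 - c % 2 := by omega
      by_cases hc : c % 2 = 0 <;> simp [Function.comp, Nat.succ_eq_add_one] <;> omega
    rw [heven, hodd]
    -- rows agree pointwise
    simp only [Prod.mk.injEq]
    constructor <;>
    · apply List.map_congr_left
      intro r _
      by_cases hr : r % 2 = 0 <;>
      · simp only [hr, if_true, if_false]
        apply List.map_congr_left
        intro c _
        have := Nat.mod_two_eq_zero_or_one (r + c)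
        have := Nat.mod_two_eq_zero_or_one c
        by_cases hc : c % 2 = 0 <;> by_cases hrc : (r + c) % 2 = 0 <;> simp [hc, hrc] <;> omega
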